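-- pv_equiv track=rewrite | github.com/dantetemplar/competitive-programming | Codeforces - Codeforces Round 1056 (Div. 2)/C_Плащи_древних_волшебников.py | solve
-- ===== SOURCE A (Python) =====
-- def compute_a(seq):
--     n = len(seq)
--     prefR = 0
--     sufL = seq.count('L')
--     res = []
--     for i, c in enumerate(seq):
--         if c == 'R':
--             prefR += 1
--         res.append(prefR + sufL)
--         if c == 'L':
--             sufL -= 1
--     return res
--
-- def solve(n: int, A: list[int]) -> int:
--     d = [A[i+1] - A[i] for i in range(n-1)]
--     cnt = 0
--     for start in ['L', 'R']:
--         s = [start]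
--         ok = True
--         for diff in d:
--             prev = s[-1]
--
--             if diff == -1 and prev == 'L':
--                 s.append('L')
--             elif diff == 0 and prev == 'L':
--                 s.append('R')
--             elif diff == 0 and prev == 'R':
--                 s.append('L')
--             elif diff == 1 and prev == 'R':
--                 s.append('R')
--             else:
--                 ok = False
--                 break
--         if ok and compute_a(s) == A:
--             cnt += 1
--
--     return cnt
-- ===== SOURCE B (Python) =====
-- def solve(n: int, A: list[int]) -> int:
--     d = [A[i + 1] - A[i] for i in range(n - 1)]
--     cnt = 0
--     for start in ['L', 'R']:
--         prev = start
--         lcount = 1 if start == 'L' else 0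
--         length = 1
--         ok = True
--         for diff in d:
--             if prev == 'L' and diff == -1:
--                 nxt = 'L'
--             elif prev == 'L' and diff == 0:
--                 nxt = 'R'
--             elif prev == 'R' and diff == 0:
--                 nxt = 'L'
--             elif prev == 'R' and diff == 1:
--                 nxt = 'R'
--             else:
--                 ok = False
--                 break
--             prev = nxt
--             if nxt == 'L':
--                 lcount += 1
--             length += 1
--         if ok and len(A) == length and A[0] == (1 if start == 'R' else 0) + lcount:
--             cnt += 1
--     return cnt
-- ===== Notes on version B (the rewrite author's own statement) =====
-- stated objective: simpler
-- what changed: B drops the compute_a helper and the full-array rebuild-and-compare: the forced build pass tracks only (prev char, L-count, length) as scalars, and a successful build is accepted iff len(A) matches and A[0] equals the O(1) reconstruction of the first array entry, since the build already forces every consecutive difference.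
import Mathlib
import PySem

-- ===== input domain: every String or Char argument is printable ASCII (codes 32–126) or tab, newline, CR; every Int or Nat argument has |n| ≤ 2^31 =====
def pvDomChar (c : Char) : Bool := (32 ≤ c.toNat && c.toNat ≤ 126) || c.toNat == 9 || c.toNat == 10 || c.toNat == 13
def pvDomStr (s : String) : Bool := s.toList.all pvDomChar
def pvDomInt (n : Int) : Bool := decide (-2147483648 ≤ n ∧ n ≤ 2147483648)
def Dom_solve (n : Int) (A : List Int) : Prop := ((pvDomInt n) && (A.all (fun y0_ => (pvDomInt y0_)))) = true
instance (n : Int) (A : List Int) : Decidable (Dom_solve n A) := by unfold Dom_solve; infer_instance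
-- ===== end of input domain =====

-- B drops the compute_a helper: the build pass tracks only (prev, L-count, length) scalars and
-- checks len(A) and A[0] in O(1) after a successful build (simpler decomposition).


-- ===== PORT A =====
-- the body of compute_a's loop, exactly as in the Python
def computeAStep (st : Int × Int × List Int) (c : Char) : Int × Int × List Int :=
  let prefR := if c = 'R' then st.1 + 1 else st.1
  let res := st.2.2 ++ [prefR + st.2.1]
  let sufL := if c = 'L' then st.2.1 - 1 else st.2.1
  (prefR, sufL, res)

-- compute_a(seq)
def computeA (seq : List Char) : List Int :=
  (seq.foldl computeAStep (0, (PySem.List.count seq 'L' : Int), [])).2.2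

-- the inner 'for diff in d' loop of A (break → none)
def buildA (d : List Int) (s : List Char) : Option (List Char) :=
  match d with
  | [] => some s
  | diff :: rest =>
    let prev := PySem.List.pyGetD s (-1) ' '
    if diff = -1 ∧ prev = 'L' then buildA rest (s ++ ['L'])
    else if diff = 0 ∧ prev = 'L' then buildA rest (s ++ ['R'])
    else if diff = 0 ∧ prev = 'R' then buildA rest (s ++ ['L'])
    else if diff = 1 ∧ prev = 'R' then buildA rest (s ++ ['R'])
    else none

def solve (n : Int) (A : List Int) : Int :=
  let d := (PySem.List.pyRange 0 (n - 1) 1).map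
    (fun i => PySem.List.pyGetD A (i + 1) 0 - PySem.List.pyGetD A i 0)
  ['L', 'R'].foldl
    (fun cnt start =>
      match buildA d [start] with
      | some s => if computeA s = A then cnt + 1 else cnt
      | none => cnt) 0

-- ===== PORT B =====
-- the inner loop of B: scalars (prev, lcount, length) instead of the string
def buildB (d : List Int) (prev : Char) (lcount : Int) (length : Int) :
    Option (Char × Int × Int) :=
  match d with
  | [] => some (prev, lcount, length)
  | diff :: rest =>
    if prev = 'L' ∧ diff = -1 then buildB rest 'L' (lcount + 1) (length + 1)
    else if prev = 'L' ∧ diff = 0 then buildB rest 'R' lcount (length + 1)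
    else if prev = 'R' ∧ diff = 0 then buildB rest 'L' (lcount + 1) (length + 1)
    else if prev = 'R' ∧ diff = 1 then buildB rest 'R' lcount (length + 1)
    else none

def solve_alt (n : Int) (A : List Int) : Int :=
  let d := (PySem.List.pyRange 0 (n - 1) 1).map
    (fun i => PySem.List.pyGetD A (i + 1) 0 - PySem.List.pyGetD A i 0)
  ['L', 'R'].foldl
    (fun cnt start =>
      match buildB d start (if start = 'L' then 1 else 0) 1 with
      | some st =>
        if (A.length : Int) = st.2.2 ∧
            PySem.List.pyGetD A 0 0 = (if start = 'R' then 1 else 0) + st.2.1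
        then cnt + 1 else cnt
      | none => cnt) 0

-- ===== PRECONDITION & SPEC =====
-- Pre_ excludes exactly the inputs where the Python A (and B) raise IndexError: n ≥ 2 with len(A) < n.
def Pre_solve (n : Int) (A : List Int) : Prop := 2 ≤ n → n ≤ (A.length : Int)
instance (n : Int) (A : List Int) : Decidable (Pre_solve n A) := by unfold Pre_solve; infer_instance
def pvWitness_solve : Int × List Int := (3, [1, 2, 1])

def Spec_solve (n : Int) (A : List Int) (out : Int) : Prop := out = solve_alt n A
instance (n : Int) (A : List Int) (out : Int) : Decidable (Spec_solve n A out) := by unfold Spec_solve; infer_instance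

-- ===== CLAIM (what is proved, stated in full; the proofs are below) =====
def Claim_equal_solve : Prop := ∀ (n : Int) (A : List Int), Dom_solve n A → Pre_solve n A → Spec_solve n A (solve n A)

-- ===== LEMMAS AND PROOFS =====

-- clean recursive version of compute_a, for reasoning
def ca : List Char → List Int
  | [] => []
  | c :: t =>
    ((if c = 'R' then 1 else 0) + (List.count 'L' (c :: t) : Int)) ::
      (ca t).map (· + (if c = 'R' then 1 else 0))

-- consecutive differences of an Int list
def diffs : List Int → List Int
  | a :: b :: t => (b - a) :: diffs (b :: t)
  | _ => []

-- the forced difference generated by a consecutive pair of chars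
def stepv (p c : Char) : Int := (if c = 'R' then 1 else 0) - (if p = 'L' then 1 else 0)

-- pair-differences of a char list
def pairsD : List Char → List Int
  | p :: c :: t => stepv p c :: pairsD (c :: t)
  | _ => []

theorem ca_length (s : List Char) : (ca s).length = s.length := by
  induction s with
  | nil => rfl
  | cons c t ih => simp [ca, ih]

theorem diffs_map_add (xs : List Int) (k : Int) :
    diffs (xs.map (· + k)) = diffs xs := by
  induction xs with
  | nil => rfl
  | cons a t ih =>
    cases t with
    | nil => rfl
    | cons b u => simpa [diffs] using ih

theorem pairsD_length (s : List Char) : (pairsD s).length = s.length - 1 := by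
  induction s with
  | nil => rfl
  | cons c t ih =>
    cases t with
    | nil => rfl
    | cons c2 t2 => simp [pairsD] at *; omega

theorem diffs_length (xs : List Int) : (diffs xs).length = xs.length - 1 := by
  induction xs with
  | nil => rfl
  | cons a t ih =>
    cases t with
    | nil => rfl
    | cons b u => simp [diffs] at *; omega

theorem diffs_ca (s : List Char) : diffs (ca s) = pairsD s := by
  induction s with
  | nil => rfl
  | cons c t ih =>
    cases t with
    | nil => rfl
    | cons c2 t2 =>
      show diffs (ca (c :: c2 :: t2)) = stepv c c2 :: pairsD (c2 :: t2)
      have h1 : ca (c :: c2 :: t2) =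
          ((if c = 'R' then 1 else 0) + (List.count 'L' (c :: c2 :: t2) : Int)) ::
            ((if c2 = 'R' then 1 else 0) + (List.count 'L' (c2 :: t2) : Int) + (if c = 'R' then 1 else 0)) ::
            ((ca t2).map (· + (if c2 = 'R' then 1 else 0))).map (· + (if c = 'R' then 1 else 0)) := by
        simp [ca]
      have h2 : ((if c2 = 'R' then (1:Int) else 0) + (List.count 'L' (c2 :: t2) : Int) + (if c = 'R' then 1 else 0)) ::
            ((ca t2).map (· + (if c2 = 'R' then 1 else 0))).map (· + (if c = 'R' then 1 else 0)) =
          ((ca (c2 :: t2)).map (· + (if c = 'R' then 1 else 0))) := by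
        simp [ca]
      rw [h1]
      show (_ - _) :: diffs (_ :: _) = _
      congr 1
      · simp only [List.count_cons, stepv]
        by_cases hL : c = 'L' <;> by_cases hR : c = 'R' <;> by_cases h2R : c2 = 'R' <;>
          simp_all <;> ring
      · rw [h2, diffs_map_add, ih]

-- equal length + equal diffs + equal head ⇒ equal lists
theorem eq_of_diffs (xs : List Int) : ∀ ys : List Int, xs.length = ys.length →
    diffs xs = diffs ys → xs.head? = ys.head? → xs = ys := by
  induction xs with
  | nil => intro ys h _ _; simpa using (List.length_eq_zero_iff.mp h.symm)
  | cons a t ih =>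
    intro ys hlen hd hh
    cases ys with
    | nil => simp at hlen
    | cons b u =>
      simp only [List.head?_cons, Option.some_inj] at hh
      subst hh
      cases t with
      | nil =>
        cases u with
        | nil => rfl
        | cons b2 u2 => simp at hlen
      | cons a2 t2 =>
        cases u with
        | nil => simp at hlen
        | cons b2 u2 =>
          simp only [diffs, List.cons.injEq] at hd
          have hb2 : a2 = b2 := by omega
          subst hb2
          have := ih (a2 :: u2) (by simpa using hlen) hd.2 rfl
          simp [this]

theorem pairsD_append (s : List Char) (c : Char) (hs : s ≠ []) :
    pairsD (s ++ [c]) = pairsD s ++ [stepv (PySem.List.pyGetD s (-1) ' ') c] := by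
  induction s with
  | nil => simp at hs
  | cons p t ih =>
    cases t with
    | nil =>
      rw [PySem.List.pyGetD_neg_one (xs := [p]) ' ' (by simp)]
      rfl
    | cons q u =>
      have h1 : pairsD ((p :: q :: u) ++ [c]) = stepv p q :: pairsD ((q :: u) ++ [c]) := rfl
      rw [h1, ih (List.cons_ne_nil q u)]
      have h2 : PySem.List.pyGetD (p :: q :: u) (-1) ' ' = PySem.List.pyGetD (q :: u) (-1) ' ' := by
        rw [PySem.List.pyGetD_neg_one (xs := p :: q :: u) ' ' (by simp),
            PySem.List.pyGetD_neg_one (xs := q :: u) ' ' (by simp)]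
        simp [List.getLast]
      rw [h2]
      rfl

-- the invariant of buildA / buildB: B's scalars are the last char, L-count and length of A's string
theorem build_corr (d : List Int) : ∀ s : List Char, s ≠ [] →
    buildB d (PySem.List.pyGetD s (-1) ' ') (s.count 'L' : Int) (s.length : Int) =
      (buildA d s).map
        (fun s' => (PySem.List.pyGetD s' (-1) ' ', ((s'.count 'L' : Int), (s'.length : Int)))) := by
  induction d with
  | nil => intro s hs; rfl
  | cons diff rest ih =>
    intro s hs
    simp only [buildA, buildB]
    have hnext : ∀ c : Char, buildB rest c ((s ++ [c]).count 'L' : Int) ((s ++ [c]).length : Int) =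
        (buildA rest (s ++ [c])).map
          (fun s' => (PySem.List.pyGetD s' (-1) ' ', ((s'.count 'L' : Int), (s'.length : Int)))) := by
      intro c
      have h := ih (s ++ [c]) (by simp)
      rwa [PySem.List.pyGetD_neg_one_append_singleton s c ' '] at h
    set prev := PySem.List.pyGetD s (-1) ' ' with hprev
    by_cases h1 : diff = -1 ∧ prev = 'L'
    · rw [if_pos ⟨h1.2, h1.1⟩, if_pos h1, ← hnext 'L']
      simp [List.count_append]
    · rw [if_neg (fun h => h1 ⟨h.2, h.1⟩), if_neg h1]
      by_cases h2 : diff = 0 ∧ prev = 'L'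
      · rw [if_pos ⟨h2.2, h2.1⟩, if_pos h2, ← hnext 'R']
        simp [List.count_append]
      · rw [if_neg (fun h => h2 ⟨h.2, h.1⟩), if_neg h2]
        by_cases h3 : diff = 0 ∧ prev = 'R'
        · rw [if_pos ⟨h3.2, h3.1⟩, if_pos h3, ← hnext 'L']
          simp [List.count_append]
        · rw [if_neg (fun h => h3 ⟨h.2, h.1⟩), if_neg h3]
          by_cases h4 : diff = 1 ∧ prev = 'R'
          · rw [if_pos ⟨h4.2, h4.1⟩, if_pos h4, ← hnext 'R']
            simp [List.count_append]
          · rw [if_neg (fun h => h4 ⟨h.2, h.1⟩), if_neg h4]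
            rfl

-- a successful build has pair-differences exactly d (beyond the seed) and keeps the seed's head
theorem buildA_pairs (d : List Int) : ∀ s s' : List Char, s ≠ [] →
    buildA d s = some s' → pairsD s' = pairsD s ++ d ∧ s'.head? = s.head? := by
  induction d with
  | nil =>
    intro s s' _ h
    simp only [buildA, Option.some_inj] at h
    subst h; simp
  | cons diff rest ih =>
    intro s s' hs h
    simp only [buildA] at h
    set prev := PySem.List.pyGetD s (-1) ' ' with hprev
    have step : ∀ c : Char, buildA rest (s ++ [c]) = some s' →
        stepv prev c = diff → pairsD s' = pairsD s ++ diff :: rest ∧ s'.head? = s.head? := by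
      intro c hb hsv
      obtain ⟨hp, hh⟩ := ih (s ++ [c]) s' (by simp) hb
      constructor
      · rw [hp, pairsD_append s c hs, ← hprev, hsv]; simp
      · rw [hh]; cases s with
        | nil => simp at hs
        | cons x t => simp
    split_ifs at h with h1 h2 h3 h4
    · exact step 'L' h (by rw [h1.2, h1.1]; decide)
    · exact step 'R' h (by rw [h2.2, h2.1]; decide)
    · exact step 'L' h (by rw [h3.2, h3.1]; decide)
    · exact step 'R' h (by rw [h4.2, h4.1]; decide)

-- compute_a's foldl computes ca
theorem computeA_loop (t : List Char) : ∀ (p : Int) (res : List Int),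
    (t.foldl computeAStep (p, (t.count 'L' : Int), res)).2.2 = res ++ (ca t).map (· + p) := by
  induction t with
  | nil => intro p res; simp [ca]
  | cons c t ih =>
    intro p res
    simp only [List.foldl_cons]
    have hstep : computeAStep (p, ((c :: t).count 'L' : Int), res) c =
        ((if c = 'R' then p + 1 else p),
         (t.count 'L' : Int),
         res ++ [(if c = 'R' then p + 1 else p) + ((c :: t).count 'L' : Int)]) := by
      by_cases hL : c = 'L' <;> simp [computeAStep, hL]
    rw [hstep, ih]
    have hca : (ca (c :: t)).map (· + p) =
        ((if c = 'R' then (1:Int) else 0) + (List.count 'L' (c :: t) : Int) + p) ::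
          (ca t).map (· + (if c = 'R' then p + 1 else p)) := by
      simp only [ca, List.map_cons, List.map_map, List.cons.injEq]
      refine ⟨by trivial, List.map_congr_left fun a _ => ?_⟩
      simp only [Function.comp_apply]
      split_ifs <;> ring
    rw [hca]
    simp only [List.append_assoc, List.singleton_append]
    congr 2
    split_ifs <;> ring

theorem computeA_eq_ca (s : List Char) : computeA s = ca s := by
  have h := computeA_loop s 0 []
  simp only [computeA, PySem.List.count_eq]
  rw [h]
  simp

-- the per-start branch of A's fold equals the per-start branch of B's fold
theorem branch_eq (A d : List Int) (start : Char)
    (hd : (A.length : Int) = (d.length : Int) + 1 → d = diffs A) (cnt : Int) :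
    (match buildA d [start] with
     | some s => if computeA s = A then cnt + 1 else cnt
     | none => cnt) =
    (match buildB d start (if start = 'L' then 1 else 0) 1 with
     | some st =>
       if (A.length : Int) = st.2.2 ∧
           PySem.List.pyGetD A 0 0 = (if start = 'R' then 1 else 0) + st.2.1
       then cnt + 1 else cnt
     | none => cnt) := by
  have corr := build_corr d [start] (by simp)
  rw [PySem.List.pyGetD_neg_one (xs := [start]) ' ' (by simp)] at corr
  have hinit : (([start].count 'L' : Nat) : Int) = (if start = 'L' then 1 else 0) := by
    by_cases h : start = 'L' <;> simp [h]
  rw [List.getLast_singleton, hinit] at corr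
  norm_num at corr
  cases hbuild : buildA d [start] with
  | none =>
    rw [hbuild] at corr
    simp only [Option.map_none] at corr
    rw [corr]
  | some s =>
    rw [hbuild] at corr
    simp only [Option.map_some] at corr
    rw [corr]
    show (if computeA s = A then cnt + 1 else cnt) =
      (if ((A.length : Int) = (s.length : Int) ∧
          PySem.List.pyGetD A 0 0 = (if start = 'R' then 1 else 0) + (s.count 'L' : Int))
       then cnt + 1 else cnt)
    rw [computeA_eq_ca]
    refine if_congr ?_ rfl rfl
    obtain ⟨hpairs, hhead⟩ := buildA_pairs d [start] s (by simp) hbuild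
    simp only [pairsD] at hpairs
    rw [List.nil_append] at hpairs
    obtain ⟨t, hst⟩ : ∃ t, s = start :: t := by
      cases s with
      | nil => simp at hhead
      | cons x t => simp at hhead; exact ⟨t, by rw [hhead]⟩
    have hcahead : (ca s).head? = some ((if start = 'R' then 1 else 0) + (s.count 'L' : Int)) := by
      rw [hst]; simp [ca]
    by_cases hlen : (A.length : Int) = (s.length : Int)
    · have hA0 : A ≠ [] := by
        intro h
        rw [h, hst] at hlen
        simp at hlen
        omega
      have hdlen : (A.length : Int) = (d.length : Int) + 1 := by
        have hpl := pairsD_length s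
        rw [hpairs] at hpl
        rw [hst] at hpl hlen
        simp at hpl hlen
        omega
      have hdA := hd hdlen
      have hget : PySem.List.pyGetD A 0 0 = A.head hA0 := by
        rw [PySem.List.pyGetD_zero]
        cases A with
        | nil => simp at hA0
        | cons a t => simp
      constructor
      · intro hEq
        refine ⟨hlen, ?_⟩
        rw [hget]
        have hh : A.head? = (ca s).head? := by rw [← hEq]
        rw [hcahead, List.head?_eq_some_head hA0] at hh
        exact Option.some_inj.mp hh
      · rintro ⟨-, hh0⟩
        apply eq_of_diffs
        · rw [ca_length]; exact_mod_cast hlen.symm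
        · rw [diffs_ca, hpairs, hdA]
        · rw [hcahead, List.head?_eq_some_head hA0, ← hget, hh0]
    · constructor
      · intro hEq
        exact absurd (by rw [← hEq, ca_length]) hlen
      · rintro ⟨h, -⟩
        exact absurd h hlen

theorem diffs_getElem (A : List Int) : ∀ (i : Nat) (h2 : i < (diffs A).length) (h : i + 1 < A.length),
    (diffs A)[i]'h2 = A[i+1]'h - A[i]'(by omega) := by
  induction A with
  | nil => intro i h2 h; simp at h
  | cons a t ih =>
    intro i h2 h
    cases t with
    | nil => simp at h
    | cons b u =>
      cases i with
      | zero => simp [diffs]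
      | succ j =>
        have := ih j (by simp [diffs_length] at h2 ⊢; omega) (by simp at h ⊢; omega)
        simpa [diffs] using this

-- the common difference list of both ports, as diffs A, under the length condition
theorem dlist_diffs (n : Int) (A : List Int) :
    ((A.length : Int) = (((PySem.List.pyRange 0 (n - 1) 1).map
      (fun i => PySem.List.pyGetD A (i + 1) 0 - PySem.List.pyGetD A i 0)).length : Int) + 1) →
    (PySem.List.pyRange 0 (n - 1) 1).map
      (fun i => PySem.List.pyGetD A (i + 1) 0 - PySem.List.pyGetD A i 0) = diffs A := by
  intro hlen
  rw [List.length_map, PySem.List.length_pyRange_one] at hlen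
  set m := (n - 1 - 0).toNat with hm
  have hAlen : A.length = m + 1 := by omega
  rw [PySem.List.pyRange_one, List.map_map]
  apply List.ext_getElem
  · rw [List.length_map, List.length_range, diffs_length, hAlen]
    omega
  · intro i hi1 hi2
    simp only [List.getElem_map, List.getElem_range, Function.comp]
    rw [List.length_map, List.length_range] at hi1
    have hi : i + 1 < A.length := by omega
    have hg1 : PySem.List.pyGetD A ((0:Int) + (i:Int) + 1) 0 = A[i + 1] := by
      have : (0:Int) + (i:Int) + 1 = ((i + 1 : Nat) : Int) := by push_cast; ring
      rw [this, PySem.List.pyGetD_natCast]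
      exact List.getD_eq_getElem A 0 hi
    have hg2 : PySem.List.pyGetD A ((0:Int) + (i:Int)) 0 = A[i] := by
      have : (0:Int) + (i:Int) = ((i : Nat) : Int) := by ring
      rw [this, PySem.List.pyGetD_natCast]
      exact List.getD_eq_getElem A 0 (by omega)
    rw [hg1, hg2]
    exact (diffs_getElem A i hi2 hi).symm

-- ===== VERDICT (by name: the statement is the Claim_ definition above) =====
theorem solve_spec : Claim_equal_solve := by
  intro n A _ _
  unfold Spec_solve
  show solve n A = solve_alt n A
  unfold solve solve_alt
  simp only [List.foldl_cons, List.foldl_nil]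
  rw [branch_eq A _ 'L' (dlist_diffs n A), branch_eq A _ 'R' (dlist_diffs n A)]
  rfl
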